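-- pv_equiv track=rewrite | github.com/FZJ-IEK3-VSA/quinex-utils | src/quinex_utils/parsers/quantity_parser.py | split_superstructure_into_individual_quantities
-- ===== SOURCE A (Python) =====
-- def split_superstructure_into_individual_quantities(role_set: tuple[str], quantity_span_parts: list[str]) -> tuple[list[list[str]], list[tuple[str]], list[tuple[str]]]:
--     """Split a superstructure into individual quantities based on the role set
--     and determine the superstructure type.
--
--     Args:
--         role_set (tuple): Tuple of roles of each part of the quantity superstructure span.
--         quantity_span_parts (list): List of parts of the quantity superstructure span.
--
--     Returns:
--         quantities (list): List of parts per individual quantity.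
--         quantities_roles (list): List of roles per individual quantity.
--         separators (list): List of separators and their kind.
--
--     """
--
--     # Split superstructure at separators into individual quantities.
--     quantities = []
--     quantities_roles = []
--     separators = []
--     last_separator_index = 0
--     for i, role in enumerate(role_set):
--         if role in ["range_separator", "list_separator", "multidim_separator", "ratio_separator"]:
--             if len(role_set) > i - 1 and role_set[i + 1] == "uncertainty_expression":
--                 # If the next role is an uncertainty expression, we skip the separator
--                 # (e.g., '2.30, 95% CI 1.03-5.13' should not be split into two quantities at the comma).
--                 continue
--             else:
--                 pass
--         elif role == "prefixed_quantity_modifier" and any(r not in ["prefixed_quantity_modifier","whitespace"] for r in role_set[last_separator_index:i]):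
--             # Prefixed quantity modifiers are only allowed at the beginning of a quantity span.
--             # If there are any other roles before it, it triggers a new quantity span to start.
--             if i == len(role_set) - 1:
--                 # If at end of quantity span, it is a suffixed quantity modifier.
--                 role = "suffixed_quantity_modifier"
--                 continue
--             elif quantity_span_parts[i] in ["between","up to"]:
--                 # The quantity modifier is used as a range separator here.
--                 role = "range_separator"
--                 pass
--         else:
--             continue
--
--         # Add new quantity.
--         if quantity_span_parts[last_separator_index] == " ":
--             last_separator_index += 1
--         if quantity_span_parts[i] == " ":
--             i -= 1
--
--         quantities.append(quantity_span_parts[last_separator_index:i])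
--         quantities_roles.append(role_set[last_separator_index:i])
--         separators.append((quantity_span_parts[i], role))
--         last_separator_index = i + 1
--
--     # Add last items.
--     if last_separator_index < len(role_set):
--         if quantity_span_parts[last_separator_index] == " ":
--             last_separator_index += 1
--         if quantity_span_parts[i] == " ":
--             i -= 1
--         quantities.append(quantity_span_parts[last_separator_index:])
--         quantities_roles.append(role_set[last_separator_index:])
--
--     return quantities, quantities_roles, separators
-- ===== SOURCE B (Python) =====
-- SEPARATOR_ROLES = frozenset(
--     ("range_separator", "list_separator", "multidim_separator", "ratio_separator"))
-- MODIFIER_ROLES = frozenset(("prefixed_quantity_modifier", "whitespace"))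
--
--
-- def _cut_events(role_set, parts):
--     """One linear pass: return the list of cut events (start, end, emitted_role),
--     with `start` already space-adjusted, plus the start index of the tail.
--     A running flag `seen` (a non-modifier role since the last cut) replaces A's
--     any(...) rescan of role_set[last_separator_index:i]."""
--     events = []
--     start = 0
--     seen = False
--     n = len(role_set)
--     for i, role in enumerate(role_set):
--         em = None
--         if role in SEPARATOR_ROLES:
--             if role_set[i + 1] != "uncertainty_expression":
--                 em = role
--         elif role == "prefixed_quantity_modifier" and seen and i != n - 1:
--             em = "range_separator" if parts[i] in ("between", "up to") else role
--         if em is None: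
--             seen = seen or role not in MODIFIER_ROLES
--             continue
--         s = start + 1 if parts[start] == " " else start
--         e = i - 1 if parts[i] == " " else i
--         events.append((s, e, em))
--         start = e + 1
--         seen = e != i and role not in MODIFIER_ROLES
--     return events, start
--
--
-- def split_superstructure_into_individual_quantities(role_set, quantity_span_parts):
--     events, start = _cut_events(role_set, quantity_span_parts)
--     quantities = [quantity_span_parts[s:e] for s, e, _ in events]
--     quantities_roles = [role_set[s:e] for s, e, _ in events]
--     separators = [(quantity_span_parts[e], em) for _, e, em in events]
--     if start < len(role_set):
--         if quantity_span_parts[start] == " ":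
--             start += 1
--         quantities.append(quantity_span_parts[start:])
--         quantities_roles.append(role_set[start:])
--     return quantities, quantities_roles, separators
-- ===== Notes on version B (the rewrite author's own statement) =====
-- stated objective: alternative
-- what changed: B is a two-stage pipeline: a first linear pass computes only the cut events (start, end, separator role), replacing A's any(...) rescan of role_set[last_separator_index:i] by a running boolean flag, and a second stage builds the three output lists as plain comprehensions/maps over the event list; A instead interleaves detection, slicing and accumulation of all three lists in one indexed loop with repeated slice rescans.
import Mathlib
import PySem

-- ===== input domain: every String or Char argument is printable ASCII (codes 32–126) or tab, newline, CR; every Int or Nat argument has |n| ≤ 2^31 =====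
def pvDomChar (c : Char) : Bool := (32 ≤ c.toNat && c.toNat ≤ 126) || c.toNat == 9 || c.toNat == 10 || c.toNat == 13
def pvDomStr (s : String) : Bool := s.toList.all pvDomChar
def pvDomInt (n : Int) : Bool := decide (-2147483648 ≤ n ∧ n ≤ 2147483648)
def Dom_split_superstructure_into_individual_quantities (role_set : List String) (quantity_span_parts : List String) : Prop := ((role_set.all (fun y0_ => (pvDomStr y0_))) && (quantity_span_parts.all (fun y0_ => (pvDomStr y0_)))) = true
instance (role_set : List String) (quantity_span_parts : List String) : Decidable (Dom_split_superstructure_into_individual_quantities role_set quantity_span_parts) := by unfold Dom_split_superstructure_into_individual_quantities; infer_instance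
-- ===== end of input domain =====

-- B is a two-stage pipeline (linear cut-event pass with a running flag, then three maps over
-- the events) instead of A's single loop with per-modifier slice rescans and inline accumulation.

def pvSepRoles : List String := ["range_separator", "list_separator", "multidim_separator", "ratio_separator"]
def pvModRoles : List String := ["prefixed_quantity_modifier", "whitespace"]

-- ===== PORT A =====
-- A's for-loop over enumerate(role_set); state = (last_separator_index, quantities, quantities_roles, separators).
def pvALoop (role_set parts : List String) (i last : Nat)
    (qs qrs : List (List String)) (seps : List (String × String)) :
    Nat × List (List String) × List (List String) × List (String × String) :=
  if h : i < role_set.length then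
    let role := role_set[i]
    -- `none` = A's `continue`; `some role'` = fall through to "Add new quantity" with (possibly reassigned) role
    let emit : Option String :=
      if pvSepRoles.contains role then
        (if role_set.getD (i + 1) "" == "uncertainty_expression" then none else some role)
      else if role == "prefixed_quantity_modifier"
          && (PySem.List.slice role_set (some (last : Int)) (some (i : Int))).any
               (fun r => !pvModRoles.contains r) then
        (if i == role_set.length - 1 then none
         else if parts.getD i "" == "between" || parts.getD i "" == "up to" then some "range_separator"
         else some role)
      else none
    match emit with
    | none => pvALoop role_set parts (i + 1) last qs qrs seps
    | some role' =>
        let s : Nat := if parts.getD last "" == " " then last + 1 else last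
        let e : Int := if parts.getD i "" == " " then (i : Int) - 1 else (i : Int)
        pvALoop role_set parts (i + 1) (e + 1).toNat
          (qs ++ [PySem.List.slice parts (some (s : Int)) (some e)])
          (qrs ++ [PySem.List.slice role_set (some (s : Int)) (some e)])
          (seps ++ [(PySem.List.pyGetD parts e "", role')])
  else (last, qs, qrs, seps)
termination_by role_set.length - i

def split_superstructure_into_individual_quantities (role_set : List String) (quantity_span_parts : List String) : List (List String) × List (List String) × (List (String × String)) :=
  let r := pvALoop role_set quantity_span_parts 0 0 [] [] []
  let last := r.1
  if last < role_set.length then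
    let last1 := if quantity_span_parts.getD last "" == " " then last + 1 else last
    -- (A here also reads quantity_span_parts[i] with the loop's stale i and decrements i;
    --  that i is never used afterwards, so the statement has no effect on the result.)
    (r.2.1 ++ [PySem.List.slice quantity_span_parts (some (last1 : Int)) none],
     r.2.2.1 ++ [PySem.List.slice role_set (some (last1 : Int)) none],
     r.2.2.2)
  else (r.2.1, r.2.2.1, r.2.2.2)

-- ===== PORT B =====
-- B stage 1 (_cut_events): one pass collecting cut events (s, e, em); `flag` = "a role outside
-- pvModRoles was seen since the last cut"; `s` is already space-adjusted at event creation.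
def pvBCuts (role_set parts : List String) (i start : Nat) (flag : Bool)
    (events : List (Nat × Int × String)) : List (Nat × Int × String) × Nat :=
  if h : i < role_set.length then
    let role := role_set[i]
    let em : Option String :=
      if pvSepRoles.contains role then
        (if role_set.getD (i + 1) "" != "uncertainty_expression" then some role else none)
      else if role == "prefixed_quantity_modifier" && flag && !(i == role_set.length - 1) then
        (if parts.getD i "" == "between" || parts.getD i "" == "up to" then some "range_separator"
         else some role)
      else none
    match em with
    | none =>
        pvBCuts role_set parts (i + 1) start (flag || !pvModRoles.contains role) events
    | some em' =>
        let s : Nat := if parts.getD start "" == " " then start + 1 else start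
        let e : Int := if parts.getD i "" == " " then (i : Int) - 1 else (i : Int)
        pvBCuts role_set parts (i + 1) (e + 1).toNat
          (decide (e ≠ (i : Int)) && !pvModRoles.contains role)
          (events ++ [(s, e, em')])
  else (events, start)
termination_by role_set.length - i

-- B stage 2: the three outputs are plain maps over the event list.
def pvBQuant (parts : List String) (ev : Nat × Int × String) : List String :=
  PySem.List.slice parts (some (ev.1 : Int)) (some ev.2.1)
def pvBRoles (role_set : List String) (ev : Nat × Int × String) : List String :=
  PySem.List.slice role_set (some (ev.1 : Int)) (some ev.2.1)
def pvBSep (parts : List String) (ev : Nat × Int × String) : String × String :=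
  (PySem.List.pyGetD parts ev.2.1 "", ev.2.2)

def split_superstructure_into_individual_quantities_alt (role_set : List String) (quantity_span_parts : List String) : List (List String) × List (List String) × (List (String × String)) :=
  let r := pvBCuts role_set quantity_span_parts 0 0 false []
  let events := r.1
  let start := r.2
  let quantities := events.map (pvBQuant quantity_span_parts)
  let quantities_roles := events.map (pvBRoles role_set)
  let separators := events.map (pvBSep quantity_span_parts)
  if start < role_set.length then
    let start1 := if quantity_span_parts.getD start "" == " " then start + 1 else start
    (quantities ++ [PySem.List.slice quantity_span_parts (some (start1 : Int)) none],
     quantities_roles ++ [PySem.List.slice role_set (some (start1 : Int)) none],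
     separators)
  else (quantities, quantities_roles, separators)

-- ===== PRECONDITION & SPEC =====
-- Pre_ excludes exactly the inputs on which the Python A raises IndexError: a separator role in the
-- last position (A reads role_set[i+1] there) and quantity_span_parts shorter than role_set
-- (A indexes quantity_span_parts at positions up to len(role_set)-1).
def Pre_split_superstructure_into_individual_quantities (role_set : List String) (quantity_span_parts : List String) : Prop :=
  role_set.length ≤ quantity_span_parts.length ∧ role_set.getLastD "" ∉ pvSepRoles
instance (role_set : List String) (quantity_span_parts : List String) : Decidable (Pre_split_superstructure_into_individual_quantities role_set quantity_span_parts) := by unfold Pre_split_superstructure_into_individual_quantities; infer_instance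

def pvWitness_split_superstructure_into_individual_quantities : List String × List String :=
  (["quantity_value", "list_separator", "quantity_value"], ["2", ",", "3"])

def Spec_split_superstructure_into_individual_quantities (role_set : List String) (quantity_span_parts : List String) (out : List (List String) × List (List String) × (List (String × String))) : Prop := out = split_superstructure_into_individual_quantities_alt role_set quantity_span_parts
instance (role_set : List String) (quantity_span_parts : List String) (out : List (List String) × List (List String) × (List (String × String))) : Decidable (Spec_split_superstructure_into_individual_quantities role_set quantity_span_parts out) := by unfold Spec_split_superstructure_into_individual_quantities; infer_instance

-- ===== CLAIM (what is proved, stated in full; the proofs are below) =====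
def Claim_equal_split_superstructure_into_individual_quantities : Prop := ∀ (role_set : List String) (quantity_span_parts : List String), Dom_split_superstructure_into_individual_quantities role_set quantity_span_parts → Pre_split_superstructure_into_individual_quantities role_set quantity_span_parts → Spec_split_superstructure_into_individual_quantities role_set quantity_span_parts (split_superstructure_into_individual_quantities role_set quantity_span_parts)

-- ===== LEMMAS AND PROOFS =====

-- xs[a:i+1] = xs[a:i] ++ [xs[i]]  for a ≤ i < len xs
lemma pv_slice_succ (xs : List String) (a i : Nat) (ha : a ≤ i) (hi : i < xs.length) :
    PySem.List.slice xs (some (a : Int)) (some ((i : Int) + 1)) =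
      PySem.List.slice xs (some (a : Int)) (some (i : Int)) ++ [xs[i]] := by
  have h1 : ((i : Int) + 1) = ((i + 1 : Nat) : Int) := by push_cast; ring
  rw [h1, PySem.List.slice_natCast, PySem.List.slice_natCast]
  have h2 : i + 1 - a = (i - a) + 1 := by omega
  rw [h2, List.take_add_one]
  congr 1
  rw [List.getElem?_drop]
  have h3 : a + (i - a) = i := by omega
  rw [h3, List.getElem?_eq_getElem hi]
  rfl

lemma pv_slice_self (xs : List String) (a : Nat) :
    PySem.List.slice xs (some (a : Int)) (some (a : Int)) = [] := by
  rw [PySem.List.slice_natCast]; simp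

-- Invariant: A's loop state equals the three maps over B's event accumulator, with the flag
-- equal to A's slice rescan.
lemma pvLoop_eq (role_set parts : List String) :
    ∀ k i last flag acc, role_set.length - i ≤ k → last ≤ i →
    flag = (PySem.List.slice role_set (some (last : Int)) (some (i : Int))).any
             (fun r => !pvModRoles.contains r) →
    pvALoop role_set parts i last (acc.map (pvBQuant parts)) (acc.map (pvBRoles role_set))
        (acc.map (pvBSep parts)) =
      (let r := pvBCuts role_set parts i last flag acc;
       (r.2, r.1.map (pvBQuant parts), r.1.map (pvBRoles role_set), r.1.map (pvBSep parts))) := by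
  intro k
  induction k with
  | zero =>
      intro i last flag acc hk _ _
      rw [pvALoop, pvBCuts, dif_neg (by omega), dif_neg (by omega)]
  | succ k ih =>
      intro i last flag acc hk hlast hflag
      by_cases h : i < role_set.length
      · rw [pvALoop, pvBCuts, dif_pos h, dif_pos h]
        simp only
        have hemit :
            (if pvSepRoles.contains role_set[i] then
              (if role_set.getD (i + 1) "" == "uncertainty_expression" then none else some role_set[i])
            else if role_set[i] == "prefixed_quantity_modifier"
                && (PySem.List.slice role_set (some (last : Int)) (some (i : Int))).any
                     (fun r => !pvModRoles.contains r) then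
              (if i == role_set.length - 1 then none
               else if parts.getD i "" == "between" || parts.getD i "" == "up to" then some "range_separator"
               else some role_set[i])
            else none)
            =
            (if pvSepRoles.contains role_set[i] then
              (if role_set.getD (i + 1) "" != "uncertainty_expression" then some role_set[i] else none)
            else if role_set[i] == "prefixed_quantity_modifier" && flag && !(i == role_set.length - 1) then
              (if parts.getD i "" == "between" || parts.getD i "" == "up to" then some "range_separator"
               else some role_set[i])
            else none) := by
          rw [← hflag]
          by_cases h1 : pvSepRoles.contains role_set[i]
          · simp only [h1, if_pos]
            by_cases h2 : role_set.getD (i + 1) "" == "uncertainty_expression" <;> simp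
          · simp only [h1, if_neg, Bool.false_eq_true, not_false_iff]
            by_cases h2 : role_set[i] == "prefixed_quantity_modifier"
            · by_cases h3 : flag
              · by_cases h4 : i = role_set.length - 1 <;> simp [h2, h3, h4]
              · simp [h2, h3]
            · simp [h2]
        rw [← hemit]
        cases hE : (if pvSepRoles.contains role_set[i] then
              (if role_set.getD (i + 1) "" == "uncertainty_expression" then none else some role_set[i])
            else if role_set[i] == "prefixed_quantity_modifier"
                && (PySem.List.slice role_set (some (last : Int)) (some (i : Int))).any
                     (fun r => !pvModRoles.contains r) then
              (if i == role_set.length - 1 then none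
               else if parts.getD i "" == "between" || parts.getD i "" == "up to" then some "range_separator"
               else some role_set[i])
            else none) with
        | none =>
            apply ih _ _ _ _ (by omega) (by omega)
            have hc : ((i + 1 : Nat) : Int) = (i : Int) + 1 := by push_cast; ring
            rw [hflag, hc, pv_slice_succ role_set last i hlast h, List.any_append]
            simp
        | some role' =>
            by_cases hsp : parts.getD i "" == " "
            · simp only [hsp, if_pos]
              have he1 : ((i : Int) - 1 + 1).toNat = i := by omega
              rw [he1]
              have hflag' : (decide (((i : Int) - 1) ≠ (i : Int)) && !pvModRoles.contains role_set[i])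
                  = (PySem.List.slice role_set (some (i : Int)) (some ((i + 1 : Nat) : Int))).any
                      (fun r => !pvModRoles.contains r) := by
                have hc : ((i + 1 : Nat) : Int) = (i : Int) + 1 := by push_cast; ring
                rw [hc, pv_slice_succ role_set i i (le_refl i) h, pv_slice_self, List.any_append]
                have hne : ((i : Int) - 1) ≠ (i : Int) := by omega
                simp [hne]
              have hIH := ih (i + 1) i
                  (decide (((i : Int) - 1) ≠ (i : Int)) && !pvModRoles.contains role_set[i])
                  (acc ++ [(if parts.getD last "" == " " then last + 1 else last, (i : Int) - 1, role')])
                  (by omega) (by omega) hflag'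
              simpa only [List.map_append, List.map_cons, List.map_nil, pvBQuant, pvBRoles, pvBSep] using hIH
            · simp only [hsp, if_neg, Bool.false_eq_true, not_false_iff]
              have he1 : ((i : Int) + 1).toNat = i + 1 := by omega
              rw [he1]
              have hflag' : (decide ((i : Int) ≠ (i : Int)) && !pvModRoles.contains role_set[i])
                  = (PySem.List.slice role_set (some ((i + 1 : Nat) : Int)) (some ((i + 1 : Nat) : Int))).any
                      (fun r => !pvModRoles.contains r) := by
                rw [pv_slice_self]; simp
              have hIH := ih (i + 1) (i + 1)
                  (decide ((i : Int) ≠ (i : Int)) && !pvModRoles.contains role_set[i])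
                  (acc ++ [(if parts.getD last "" == " " then last + 1 else last, (i : Int), role')])
                  (by omega) (by omega) hflag'
              simpa only [List.map_append, List.map_cons, List.map_nil, pvBQuant, pvBRoles, pvBSep] using hIH
      · rw [pvALoop, pvBCuts, dif_neg h, dif_neg h]

-- ===== VERDICT (by name: the statement is the Claim_ definition above) =====
theorem split_superstructure_into_individual_quantities_spec : Claim_equal_split_superstructure_into_individual_quantities := by
  intro role_set parts _ _
  unfold Spec_split_superstructure_into_individual_quantities
  unfold split_superstructure_into_individual_quantities split_superstructure_into_individual_quantities_alt
  have h := pvLoop_eq role_set parts role_set.length 0 0 false [] (by omega) (by omega)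
      (by rw [pv_slice_self]; rfl)
  simp only [List.map_nil] at h
  rw [h]
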